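-- pv_equiv track=rewrite | github.com/seokhwan-an/study-algorithm | 프로그래머스/2/135807. 숫자 카드 나누기/숫자 카드 나누기.py | find_max_number
-- ===== SOURCE A (Python) =====
-- def find_max_number(array, num):
--     nums = [i for i in range(1, num + 1) if num % i == 0]
--     nums.sort(reverse = True)
--
--     for num in nums:
--         for i in array:
--             if i % num == 0:
--                 break
--         else:
--             return num
--     return 0
-- ===== SOURCE B (Python) =====
-- def find_max_number(array, num):
--     # collect all divisors of num by trial division up to sqrt(num) (cofactors included)
--     divs = []
--     i = 1
--     while i * i <= num:
--         if num % i == 0: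
--             q = num // i
--             if q != i:
--                 divs.append(i)
--                 divs.append(q)
--             else:
--                 divs.append(i)
--         i += 1
--     for d in sorted(divs, reverse=True):
--         if all(x % d != 0 for x in array):
--             return d
--     return 0
-- ===== Notes on version B (the rewrite author's own statement) =====
-- stated objective: alternative
-- what changed: B generates the divisors of num by trial division only up to sqrt(num), recording each divisor together with its cofactor num//i and sorting the collected divisors once, instead of testing every candidate in 1..num; the descending check over the array uses all() instead of a for/else loop.
import Mathlib
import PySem

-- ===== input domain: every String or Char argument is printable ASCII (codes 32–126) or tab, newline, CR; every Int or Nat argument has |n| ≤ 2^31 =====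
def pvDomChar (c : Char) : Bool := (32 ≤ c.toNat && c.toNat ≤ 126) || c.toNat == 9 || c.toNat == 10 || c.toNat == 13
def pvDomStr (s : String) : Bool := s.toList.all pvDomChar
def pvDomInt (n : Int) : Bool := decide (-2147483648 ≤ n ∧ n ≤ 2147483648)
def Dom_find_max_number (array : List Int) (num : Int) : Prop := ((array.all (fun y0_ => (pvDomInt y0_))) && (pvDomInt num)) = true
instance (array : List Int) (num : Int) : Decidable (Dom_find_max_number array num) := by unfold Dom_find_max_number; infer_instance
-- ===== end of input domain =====

-- B generates the divisors of num by trial division only up to √num (recording each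
-- cofactor num // i as well), instead of testing every candidate in 1..num, then runs
-- the same descending scan over the sorted divisors (alternative algorithm).

-- ===== PORT A =====
-- the 'for num in nums: for i in array: … break / else: return num' loop of A
def findLoopA (array : List Int) : List Int → Int
  | [] => 0
  | n :: rest => if array.any (fun i => PySem.Int.mod i n == 0) then findLoopA array rest else n

def find_max_number (array : List Int) (num : Int) : Int :=
  let nums := (PySem.List.pyRange 1 (num + 1) 1).filter (fun i => PySem.Int.mod num i == 0)
  let nums := PySem.List.sorted nums (fun x => x) true
  findLoopA array nums

-- ===== PORT B =====
-- termination measure for B's while loop (cited by name in decreasing_by)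
theorem altDivs_dec (num i : Int) (h : i * i ≤ num) :
    (num + 1 - (i + 1)).toNat < (num + 1 - i).toNat := by
  have h1 : 2 * i ≤ num + 1 := by nlinarith [mul_self_nonneg (i - 1)]
  have h2 : (0 : Int) ≤ num := le_trans (mul_self_nonneg i) h
  omega

-- B's 'while i * i <= num' loop: collect divisor i and its cofactor q = num // i
def altDivs (num i : Int) (divs : List Int) : List Int :=
  if i * i ≤ num then
    if PySem.Int.mod num i == 0 then
      let q := PySem.Int.floordiv num i
      altDivs num (i + 1) (divs ++ if q != i then [i, q] else [i])
    else altDivs num (i + 1) divs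
  else divs
termination_by (num + 1 - i).toNat
decreasing_by
  all_goals
    rename_i h _
    exact altDivs_dec num i h

-- B's 'for d in sorted(divs, reverse=True): if all(...): return d' loop
def findLoopB (array : List Int) : List Int → Int
  | [] => 0
  | d :: rest => if array.all (fun x => PySem.Int.mod x d != 0) then d else findLoopB array rest

def find_max_number_alt (array : List Int) (num : Int) : Int :=
  findLoopB array (PySem.List.sorted (altDivs num 1 []) (fun x => x) true)

-- ===== PRECONDITION & SPEC =====
def Spec_find_max_number (array : List Int) (num : Int) (out : Int) : Prop := out = find_max_number_alt array num
instance (array : List Int) (num : Int) (out : Int) : Decidable (Spec_find_max_number array num out) := by unfold Spec_find_max_number; infer_instance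

-- ===== CLAIM (what is proved, stated in full; the proofs are below) =====
def Claim_equal_find_max_number : Prop := ∀ (array : List Int) (num : Int), Dom_find_max_number array num → Spec_find_max_number array num (find_max_number array num)

-- ===== LEMMAS AND PROOFS =====

-- the canonical descending list of the positive divisors of num
def canonDivs (num : Int) : List Int :=
  ((PySem.List.pyRange 1 (num + 1) 1).filter (fun i => PySem.Int.mod num i == 0)).reverse

theorem canonDivs_mem (num d : Int) :
    d ∈ canonDivs num ↔ 1 ≤ d ∧ d ≤ num ∧ PySem.Int.mod num d = 0 := by
  simp only [canonDivs, List.mem_reverse, List.mem_filter, PySem.List.mem_pyRange_one,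
    beq_iff_eq]
  constructor
  · rintro ⟨⟨h1, h2⟩, h3⟩; exact ⟨h1, by omega, h3⟩
  · rintro ⟨h1, h2, h3⟩; exact ⟨⟨h1, by omega⟩, h3⟩

theorem canonDivs_nodup (num : Int) : (canonDivs num).Nodup :=
  List.nodup_reverse.mpr ((PySem.List.nodup_pyRange_one 1 (num + 1)).filter _)

theorem canonDivs_pairwise (num : Int) :
    (canonDivs num).Pairwise (fun a b => b < a) := by
  unfold canonDivs
  rw [List.pairwise_reverse]
  exact (PySem.List.pairwise_lt_pyRange_one 1 (num + 1)).filter _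

theorem scan_eq (array : List Int) (l : List Int) : findLoopA array l = findLoopB array l := by
  induction l with
  | nil => rfl
  | cons d rest ih =>
    simp only [findLoopA, findLoopB]
    cases h : array.any (fun i => PySem.Int.mod i d == 0) with
    | true =>
      have : (array.all fun x => PySem.Int.mod x d != 0) = false := by
        simp only [List.any_eq_true] at h
        obtain ⟨x, hx, hx0⟩ := h
        simp only [List.all_eq_false]
        exact ⟨x, hx, by simpa using hx0⟩
      simp [this, ih]
    | false =>
      have : (array.all fun x => PySem.Int.mod x d != 0) = true := by
        simp only [List.any_eq_false] at h
        simp only [List.all_eq_true]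
        intro x hx
        simpa using h x hx
      simp [this]

-- unfolding equations for the three branches of altDivs
theorem altDivs_step1 (num i : Int) (divs : List Int) (hle : i * i ≤ num)
    (hmod : (PySem.Int.mod num i == 0) = true) :
    altDivs num i divs = altDivs num (i + 1)
      (divs ++ if PySem.Int.floordiv num i != i then [i, PySem.Int.floordiv num i] else [i]) := by
  rw [altDivs]; simp [hle, hmod]

theorem altDivs_step2 (num i : Int) (divs : List Int) (hle : i * i ≤ num)
    (hmod : ¬ (PySem.Int.mod num i == 0) = true) :
    altDivs num i divs = altDivs num (i + 1) divs := by
  rw [altDivs]; simp [hle, hmod]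

theorem altDivs_step3 (num i : Int) (divs : List Int) (hle : ¬ i * i ≤ num) :
    altDivs num i divs = divs := by
  rw [altDivs]; simp [hle]

-- exact-division facts for a divisor i with i*i ≤ num
theorem div_facts (num i : Int) (h1 : 1 ≤ i) (h2 : i * i ≤ num) (h3 : PySem.Int.mod num i = 0) :
    num = i * PySem.Int.floordiv num i ∧ i ≤ PySem.Int.floordiv num i ∧
      PySem.Int.mod num (PySem.Int.floordiv num i) = 0 ∧
      PySem.Int.floordiv num (PySem.Int.floordiv num i) = i := by
  have hipos : (0 : Int) < i := by omega
  have hd : i ∣ num := (PySem.Int.mod_eq_zero_iff_dvd num i).mp h3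
  have hf : PySem.Int.floordiv num i = num / i := PySem.Int.floordiv_eq_ediv_of_pos hipos
  have hmul : i * (num / i) = num := Int.mul_ediv_cancel' hd
  have hle : i ≤ num / i := by
    have : i * i ≤ i * (num / i) := by rw [hmul]; exact h2
    exact le_of_mul_le_mul_left this hipos
  have hqpos : (0 : Int) < num / i := lt_of_lt_of_le hipos hle
  refine ⟨by rw [hf, hmul], by rw [hf]; exact hle, ?_, ?_⟩
  · rw [hf, PySem.Int.mod_eq_zero_iff_dvd]
    exact ⟨i, by rw [mul_comm]; exact hmul.symm⟩
  · rw [hf, PySem.Int.floordiv_eq_ediv_of_pos hqpos]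
    have : num = num / i * i := by rw [mul_comm]; exact hmul.symm
    calc num / (num / i) = num / i * i / (num / i) := by rw [← this]
    _ = i := Int.mul_ediv_cancel_left i (ne_of_gt hqpos)

theorem altDivs_mem (num i : Int) (divs : List Int) :
    1 ≤ i → ∀ d, (d ∈ altDivs num i divs ↔ d ∈ divs ∨
      ∃ j, i ≤ j ∧ j * j ≤ num ∧ PySem.Int.mod num j = 0 ∧
        (d = j ∨ d = PySem.Int.floordiv num j)) := by
  induction i, divs using altDivs.induct with
  | num => exact num
  | case1 i divs hle hmod q ih =>
    intro hi d
    have hqdef : q = PySem.Int.floordiv num i := rfl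
    simp only [hqdef, dite_eq_ite] at ih
    rw [altDivs_step1 num i divs hle hmod]
    rw [ih (by omega) d]
    have hmod' : PySem.Int.mod num i = 0 := by simpa using hmod
    obtain ⟨heq, hiq, hqmod, hqdiv⟩ := div_facts num i hi hle hmod'
    simp only [List.mem_append]
    constructor
    · rintro (⟨hd | hL⟩ | ⟨j, hj1, hj2, hj3, hj4⟩)
      · exact Or.inl hd
      · refine Or.inr ⟨i, le_rfl, hle, hmod', ?_⟩
        by_cases hq : (PySem.Int.floordiv num i != i) = true
        · simp only [if_pos hq, List.mem_cons, List.not_mem_nil, or_false] at hL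
          rcases hL with h | h
          · exact Or.inl h
          · exact Or.inr h
        · simp only [if_neg hq, List.mem_singleton] at hL
          exact Or.inl hL
      · exact Or.inr ⟨j, by omega, hj2, hj3, hj4⟩
    · rintro (hd | ⟨j, hj1, hj2, hj3, hj4⟩)
      · exact Or.inl (Or.inl hd)
      · by_cases hji : j = i
        · subst hji
          refine Or.inl (Or.inr ?_)
          by_cases hq : (PySem.Int.floordiv num j != j) = true
          · simp only [if_pos hq, List.mem_cons]
            tauto
          · simp only [bne_iff_ne, ne_eq, not_not] at hq
            simp only [hq, bne_self_eq_false, Bool.false_eq_true, if_false, List.mem_singleton]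
            rcases hj4 with h | h
            · exact h
            · rw [h, hq]
        · exact Or.inr ⟨j, by omega, hj2, hj3, hj4⟩
  | case2 i divs hle hmod ih =>
    intro hi d
    rw [altDivs_step2 num i divs hle hmod]
    rw [ih (by omega) d]
    constructor
    · rintro (hd | ⟨j, hj1, hj2, hj3, hj4⟩)
      · exact Or.inl hd
      · exact Or.inr ⟨j, by omega, hj2, hj3, hj4⟩
    · rintro (hd | ⟨j, hj1, hj2, hj3, hj4⟩)
      · exact Or.inl hd
      · have hji : j ≠ i := by
          intro h; subst h
          exact hmod (by simp [hj3])
        exact Or.inr ⟨j, by omega, hj2, hj3, hj4⟩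
  | case3 i divs hle =>
    intro hi d
    rw [altDivs_step3 num i divs hle]
    constructor
    · exact Or.inl
    · rintro (hd | ⟨j, hj1, hj2, hj3, hj4⟩)
      · exact hd
      · exfalso
        have : i * i ≤ j * j := by nlinarith
        exact hle (le_trans this hj2)

theorem altDivs_nodup (num i : Int) (divs : List Int) :
    1 ≤ i → divs.Nodup →
    (∀ a ∈ divs, (a < i ∧ a * a ≤ num) ∨
      (num < a * a ∧ PySem.Int.mod num a = 0 ∧ PySem.Int.floordiv num a < i)) →
    (altDivs num i divs).Nodup := by
  induction i, divs using altDivs.induct with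
  | num => exact num
  | case1 i divs hle hmod q ih =>
    intro hi hnd hinv
    have hqdef : q = PySem.Int.floordiv num i := rfl
    simp only [hqdef, dite_eq_ite] at ih
    rw [altDivs_step1 num i divs hle hmod]
    have hmod' : PySem.Int.mod num i = 0 := by simpa using hmod
    obtain ⟨heq, hiq, hqmod, hqdiv⟩ := div_facts num i hi hle hmod'
    have hinotin : i ∉ divs := by
      intro h
      rcases hinv i h with ⟨h1, _⟩ | ⟨h1, _⟩
      · omega
      · exact absurd hle (not_le.mpr h1)
    refine ih (by omega) ?_ ?_
    · by_cases hq : (PySem.Int.floordiv num i != i) = true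
      · have hiq' : i < PySem.Int.floordiv num i := by
          rcases lt_or_eq_of_le hiq with h | h
          · exact h
          · simp [← h] at hq
        have hqq : num < PySem.Int.floordiv num i * PySem.Int.floordiv num i := by nlinarith
        have hqnotin : PySem.Int.floordiv num i ∉ divs := by
          intro h
          rcases hinv _ h with ⟨_, h2⟩ | ⟨_, _, h3⟩
          · exact absurd h2 (not_le.mpr hqq)
          · rw [hqdiv] at h3; omega
        rw [if_pos hq, List.nodup_append]
        refine ⟨hnd, List.nodup_cons.mpr ⟨by simp; omega, List.nodup_singleton _⟩, ?_⟩
        intro a ha b hb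
        simp at hb
        rcases hb with rfl | rfl
        · exact fun h => hinotin (h ▸ ha)
        · exact fun h => hqnotin (h ▸ ha)
      · rw [if_neg hq, List.nodup_append]
        refine ⟨hnd, List.nodup_singleton i, ?_⟩
        intro a ha b hb
        simp at hb
        subst hb
        exact fun h => hinotin (h ▸ ha)
    · intro a ha
      rw [List.mem_append] at ha
      rcases ha with ha | ha
      · rcases hinv a ha with ⟨h1, h2⟩ | ⟨h1, h2, h3⟩
        · exact Or.inl ⟨by omega, h2⟩
        · exact Or.inr ⟨h1, h2, by omega⟩
      · by_cases hq : (PySem.Int.floordiv num i != i) = true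
        · simp only [if_pos hq, List.mem_cons, List.not_mem_nil,
            or_false] at ha
          have hiq' : i < PySem.Int.floordiv num i := by
            rcases lt_or_eq_of_le hiq with h | h
            · exact h
            · simp [← h] at hq
          rcases ha with rfl | rfl
          · exact Or.inl ⟨by omega, hle⟩
          · exact Or.inr ⟨by nlinarith, hqmod, by omega⟩
        · simp only [if_neg hq, List.mem_singleton] at ha
          subst ha
          exact Or.inl ⟨by omega, hle⟩
  | case2 i divs hle hmod ih =>
    intro hi hnd hinv
    rw [altDivs_step2 num i divs hle hmod]
    refine ih (by omega) hnd ?_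
    intro a ha
    rcases hinv a ha with ⟨h1, h2⟩ | ⟨h1, h2, h3⟩
    · exact Or.inl ⟨by omega, h2⟩
    · exact Or.inr ⟨h1, h2, by omega⟩
  | case3 i divs hle =>
    intro _ hnd _
    rw [altDivs_step3 num i divs hle]
    exact hnd

theorem sqrt_cover (num d : Int) :
    (∃ j, 1 ≤ j ∧ j * j ≤ num ∧ PySem.Int.mod num j = 0 ∧
      (d = j ∨ d = PySem.Int.floordiv num j)) ↔
    (1 ≤ d ∧ d ≤ num ∧ PySem.Int.mod num d = 0) := by
  constructor
  · rintro ⟨j, hj1, hj2, hj3, hj4⟩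
    obtain ⟨heq, hjq, hqmod, hqdiv⟩ := div_facts num j hj1 hj2 hj3
    rcases hj4 with rfl | rfl
    · exact ⟨hj1, by nlinarith, hj3⟩
    · refine ⟨by omega, by nlinarith, hqmod⟩
  · rintro ⟨h1, h2, h3⟩
    by_cases hdd : d * d ≤ num
    · exact ⟨d, h1, hdd, h3, Or.inl rfl⟩
    · have hdpos : (0 : Int) < d := by omega
      have hd : d ∣ num := (PySem.Int.mod_eq_zero_iff_dvd num d).mp h3
      have hmul : d * (num / d) = num := Int.mul_ediv_cancel' hd
      set q := num / d with hqdef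
      have hq1 : 1 ≤ q := by nlinarith
      have hqd : q < d := by nlinarith
      have hqq : q * q ≤ num := by nlinarith
      have hqmod : PySem.Int.mod num q = 0 := by
        rw [PySem.Int.mod_eq_zero_iff_dvd]
        exact ⟨d, by rw [mul_comm]; exact hmul.symm⟩
      refine ⟨q, hq1, hqq, hqmod, Or.inr ?_⟩
      rw [PySem.Int.floordiv_eq_ediv_of_pos (by omega : (0:Int) < q)]
      have : num = q * d := by rw [mul_comm]; exact hmul.symm
      rw [this, Int.mul_ediv_cancel_left d (by omega : q ≠ 0)]

theorem altDivs_perm (num : Int) : (canonDivs num).Perm (altDivs num 1 []) := by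
  rw [List.perm_ext_iff_of_nodup (canonDivs_nodup num)
    (altDivs_nodup num 1 [] le_rfl List.nodup_nil (by simp))]
  intro d
  rw [canonDivs_mem, altDivs_mem num 1 [] le_rfl d]
  simp only [List.not_mem_nil, false_or]
  exact (sqrt_cover num d).symm

-- ===== VERDICT (by name: the statement is the Claim_ definition above) =====
theorem find_max_number_spec : Claim_equal_find_max_number := by
  intro array num _
  unfold Spec_find_max_number find_max_number find_max_number_alt
  have hA : PySem.List.sorted ((PySem.List.pyRange 1 (num + 1) 1).filter
      (fun i => PySem.Int.mod num i == 0)) (fun x => x) true = canonDivs num :=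
    PySem.List.sorted_rev_eq_of_perm_of_pairwise_gt _ _ _
      (List.reverse_perm _) (canonDivs_pairwise num)
  have hB : PySem.List.sorted (altDivs num 1 []) (fun x => x) true = canonDivs num :=
    PySem.List.sorted_rev_eq_of_perm_of_pairwise_gt _ _ _
      (altDivs_perm num) (canonDivs_pairwise num)
  simp only [hA, hB, scan_eq]
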